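-- pv_equiv track=rewrite | github.com/JBLanier/pipeline-psro | multiplayer-rl/mprl/scripts/poker_parallel_algos/utils/live_policy_payoff_tracker.py | _check_only_latest_policies_are_active
-- ===== SOURCE A (Python) =====
-- def _check_only_latest_policies_are_active(policies_active_states):
--     should_all_be_active_now = False
--     for is_active in policies_active_states:
--         if is_active and not should_all_be_active_now:
--             should_all_be_active_now = True
--         if should_all_be_active_now and not is_active:
--             return False
--     return True
-- ===== SOURCE B (Python) =====
-- def _check_only_latest_policies_are_active(policies_active_states):
--     num_active = sum(1 for x in policies_active_states if x)
--     return all(policies_active_states[len(policies_active_states) - num_active:])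
-- ===== Notes on version B (the rewrite author's own statement) =====
-- stated objective: alternative
-- what changed: Replaced the stateful transition-detecting scan with a counting argument: count the truthy entries and verify the suffix of exactly that length is all truthy (actives form a contiguous suffix iff the last num_active entries are all active).
import Mathlib
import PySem

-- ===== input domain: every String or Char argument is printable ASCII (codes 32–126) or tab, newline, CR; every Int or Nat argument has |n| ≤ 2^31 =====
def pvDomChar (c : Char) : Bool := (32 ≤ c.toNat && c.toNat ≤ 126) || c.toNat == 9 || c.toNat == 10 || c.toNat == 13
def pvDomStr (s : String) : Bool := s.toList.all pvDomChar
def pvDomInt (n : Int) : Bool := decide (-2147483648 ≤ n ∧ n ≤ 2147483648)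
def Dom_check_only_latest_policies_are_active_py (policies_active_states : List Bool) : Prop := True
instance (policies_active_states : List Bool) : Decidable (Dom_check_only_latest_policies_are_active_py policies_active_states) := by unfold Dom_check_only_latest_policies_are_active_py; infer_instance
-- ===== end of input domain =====

-- B replaces A's stateful transition-detecting scan by a counting check: count the
-- active entries and verify the suffix of exactly that length is all active.

-- ===== PORT A =====
-- Loop with flag and early return, as structural recursion carrying the flag.
def check_only_latest_policies_are_active_go (should_all_be_active_now : Bool) : List Bool → Bool
  | [] => true
  | is_active :: rest =>
    let flag := if is_active && !should_all_be_active_now then true else should_all_be_active_now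
    if flag && !is_active then false
    else check_only_latest_policies_are_active_go flag rest

def check_only_latest_policies_are_active_py (policies_active_states : List Bool) : Bool :=
  check_only_latest_policies_are_active_go false policies_active_states

-- ===== PORT B =====
-- num_active = sum(1 for x in l if x); all(l[len(l) - num_active:]).
-- The slice index len(l) - num_active is ≥ 0, so the slice is List.drop.
def check_only_latest_policies_are_active_py_alt (policies_active_states : List Bool) : Bool :=
  let num_active := policies_active_states.countP (fun x => x)
  (policies_active_states.drop (policies_active_states.length - num_active)).all (fun x => x)

-- ===== PRECONDITION & SPEC =====
def Spec_check_only_latest_policies_are_active_py (policies_active_states : List Bool) (out : Bool) : Prop := out = check_only_latest_policies_are_active_py_alt policies_active_states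
instance (policies_active_states : List Bool) (out : Bool) : Decidable (Spec_check_only_latest_policies_are_active_py policies_active_states out) := by unfold Spec_check_only_latest_policies_are_active_py; infer_instance

-- ===== CLAIM (what is proved, stated in full; the proofs are below) =====
def Claim_equal_check_only_latest_policies_are_active_py : Prop := ∀ (policies_active_states : List Bool), Dom_check_only_latest_policies_are_active_py policies_active_states → Spec_check_only_latest_policies_are_active_py policies_active_states (check_only_latest_policies_are_active_py policies_active_states)

-- ===== LEMMAS AND PROOFS =====
-- countP of a dropped suffix never exceeds the countP of the whole list.
theorem countP_drop_le (p : Bool → Bool) (l : List Bool) (k : Nat) :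
    (l.drop k).countP p ≤ l.countP p := by
  conv_rhs => rw [← List.take_append_drop k l]
  rw [List.countP_append]
  omega

-- With the flag set, A's loop returns true iff every remaining element is true.
theorem go_true_eq_all (l : List Bool) :
    check_only_latest_policies_are_active_go true l = l.all (fun x => x) := by
  induction l with
  | nil => rfl
  | cons a rest ih =>
    cases a <;> simp [check_only_latest_policies_are_active_go, List.all_cons, ih]

-- A's loop from the clear flag equals B's counting check.
theorem go_false_eq_alt (l : List Bool) :
    check_only_latest_policies_are_active_go false l =
      check_only_latest_policies_are_active_py_alt l := by
  induction l with
  | nil => rfl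
  | cons a rest ih =>
    have hcnt : rest.countP (fun x => x) ≤ rest.length := List.countP_le_length
    cases a
    · -- false head: loop recurses with clear flag; count unchanged, one more drop
      have hidx : rest.length + 1 - rest.countP (fun x => x)
          = (rest.length - rest.countP (fun x => x)) + 1 := by omega
      simp only [check_only_latest_policies_are_active_py_alt] at ih ⊢
      simpa [check_only_latest_policies_are_active_go, List.countP_cons, hidx,
        List.drop_succ_cons] using ih
    · -- true head: loop switches to the all-true phase
      have hidx : rest.length + 1 - (rest.countP (fun x => x) + 1)
          = rest.length - rest.countP (fun x => x) := by omega
      simp only [check_only_latest_policies_are_active_go,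
        check_only_latest_policies_are_active_py_alt, List.countP_cons,
        List.length_cons]
      by_cases hall : rest.all (fun x => x) = true
      · -- all true: count equals length, slice is the whole list, both sides true
        have hc : rest.countP (fun x => x) = rest.length := by
          rw [List.countP_eq_length]
          intro x hx; exact List.all_eq_true.mp hall x hx
        simp [go_true_eq_all, hall, hc]
      · -- some false in rest: the suffix of length count+1 must contain a false
        have hlt : rest.countP (fun x => x) < rest.length := by
          rcases Nat.lt_or_ge (rest.countP (fun x => x)) rest.length with h | h
          · exact h
          · exact absurd (by
              rw [List.all_eq_true]; intro x hx
              exact List.countP_eq_length.mp (Nat.le_antisymm hcnt h) x hx) hall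
        have hidx2 : rest.length - rest.countP (fun x => x)
            = (rest.length - rest.countP (fun x => x) - 1) + 1 := by omega
        -- the suffix has length count+1 but at most count trues, so not all true
        have hsuf : ((rest.drop (rest.length - rest.countP (fun x => x) - 1)).all
            (fun x => x)) = false := by
          by_contra h
          have h' : (rest.drop (rest.length - rest.countP (fun x => x) - 1)).all
              (fun x => x) = true := by
            cases hb : (rest.drop (rest.length - rest.countP (fun x => x) - 1)).all
                (fun x => x)
            · exact absurd hb h
            · rfl
          have hlen : (rest.drop (rest.length - rest.countP (fun x => x) - 1)).length
              = rest.countP (fun x => x) + 1 := by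
            rw [List.length_drop]; omega
          have hce : (rest.drop (rest.length - rest.countP (fun x => x) - 1)).countP
              (fun x => x) = rest.countP (fun x => x) + 1 := by
            rw [List.countP_eq_length.mpr (fun x hx => List.all_eq_true.mp h' x hx), hlen]
          have := countP_drop_le (fun x => x) rest (rest.length - rest.countP (fun x => x) - 1)
          omega
        simp [go_true_eq_all, hall]
        rw [hidx2, List.drop_succ_cons]
        obtain ⟨x, hm, hx⟩ := List.all_eq_false.mp hsuf
        cases x
        · exact hm
        · simp at hx

-- ===== VERDICT (by name: the statement is the Claim_ definition above) =====
theorem check_only_latest_policies_are_active_py_spec : Claim_equal_check_only_latest_policies_are_active_py := by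
  intro l _
  unfold Spec_check_only_latest_policies_are_active_py check_only_latest_policies_are_active_py
  exact go_false_eq_alt l
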